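-- pv_equiv track=rewrite | github.com/markkuether/school-portfolio | Development Examples/Twitter_API/get_tweets.py | count_christmas
-- ===== SOURCE A (Python) =====
-- def count_christmas(tweet_text: str):
--     """
--     Accepts the text of a single tweet.
--     Determines if specified strings exist
--     Returns a 2-tuple of the results of
--     happy vs merry.
--     """
--
--     merry = False
--     happy = False
--     tweet_text = tweet_text.upper()
--     merry_list = ["MERRY CHRISTMAS", "MERRY XMAS",
--                   "MERRY-CHRISTMAS", "MERRY-XMAS"]
--     happy_list = ["HAPPY CHRISTMAS", "HAPPY XMAS",
--                   "HAPPY-CHRISTMAS", "HAPPY-XMAS"]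
--     for greet in merry_list:
--         if greet in tweet_text:
--             merry = True
--             break
--
--     for greet in happy_list:
--         if greet in tweet_text:
--             happy = True
--             break
--
--     return (merry, happy)
-- ===== SOURCE B (Python) =====
-- def count_christmas(tweet_text: str):
--     """Single left-to-right scan: at each position test for MERRY/HAPPY
--     followed by ' ' or '-' and CHRISTMAS/XMAS, with early exit once both found."""
--     text = tweet_text.upper()
--     merry = False
--     happy = False
--     for i in range(len(text)):
--         if merry and happy:
--             break
--         tail = text[i:]
--         if not merry and tail.startswith(("MERRY ", "MERRY-")) and tail[6:].startswith(("CHRISTMAS", "XMAS")):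
--             merry = True
--         if not happy and tail.startswith(("HAPPY ", "HAPPY-")) and tail[6:].startswith(("CHRISTMAS", "XMAS")):
--             happy = True
--     return (merry, happy)
-- ===== Notes on version B (the rewrite author's own statement) =====
-- stated objective: alternative
-- what changed: A runs up to eight independent substring searches (four 'greet in text' scans per flag); B makes one left-to-right scan of the uppercased text, testing both greetings at each position via startswith with an early exit once both flags are set.
import Mathlib
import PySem

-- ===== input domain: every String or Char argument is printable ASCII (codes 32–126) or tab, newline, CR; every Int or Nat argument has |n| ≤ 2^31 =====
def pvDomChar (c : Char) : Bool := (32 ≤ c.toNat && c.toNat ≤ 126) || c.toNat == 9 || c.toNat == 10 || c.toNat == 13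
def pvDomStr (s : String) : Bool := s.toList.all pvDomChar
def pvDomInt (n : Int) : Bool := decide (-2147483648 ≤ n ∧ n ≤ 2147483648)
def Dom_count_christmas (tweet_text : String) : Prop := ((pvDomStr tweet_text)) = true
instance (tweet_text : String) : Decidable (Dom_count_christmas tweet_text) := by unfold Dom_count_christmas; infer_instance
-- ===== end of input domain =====

-- B replaces A's four separate substring searches per flag by ONE left-to-right scan of the
-- uppercased text that tests both greetings at each position (alternative decomposition, not faster).

-- ===== PORT A =====
-- A's 'for greet in list: if greet in text: flag = True; break' loop, literally.
def pvLoopA : List String → String → Bool → Bool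
  | [], _, flag => flag
  | g :: rest, t, flag =>
    if PySem.Str.isIn g t then true else pvLoopA rest t flag

def count_christmas (tweet_text : String) : Bool × Bool :=
  let merry := false
  let happy := false
  let up := PySem.Str.upper tweet_text
  let merry_list := ["MERRY CHRISTMAS", "MERRY XMAS", "MERRY-CHRISTMAS", "MERRY-XMAS"]
  let happy_list := ["HAPPY CHRISTMAS", "HAPPY XMAS", "HAPPY-CHRISTMAS", "HAPPY-XMAS"]
  let merry := pvLoopA merry_list up merry
  let happy := pvLoopA happy_list up happy
  (merry, happy)

-- ===== PORT B =====
-- tail[6:].startswith(("CHRISTMAS", "XMAS"))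
def pvBodyAt (s : List Char) : Bool :=
  "CHRISTMAS".toList.isPrefixOf s || "XMAS".toList.isPrefixOf s

def pvMerryAt (s : List Char) : Bool :=
  ("MERRY ".toList.isPrefixOf s || "MERRY-".toList.isPrefixOf s) && pvBodyAt (s.drop 6)

def pvHappyAt (s : List Char) : Bool :=
  ("HAPPY ".toList.isPrefixOf s || "HAPPY-".toList.isPrefixOf s) && pvBodyAt (s.drop 6)

-- Source B's 'for i in range(len(text))' over text[i:], as recursion on the suffixes.
def pvScan : List Char → Bool → Bool → Bool × Bool
  | [], merry, happy => (merry, happy)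
  | c :: t, merry, happy =>
    if merry && happy then (merry, happy)
    else
      let merry' := if !merry && pvMerryAt (c :: t) then true else merry
      let happy' := if !happy && pvHappyAt (c :: t) then true else happy
      pvScan t merry' happy'

def count_christmas_alt (tweet_text : String) : Bool × Bool :=
  pvScan (PySem.Str.upper tweet_text).toList false false

-- ===== PRECONDITION & SPEC =====
def Spec_count_christmas (tweet_text : String) (out : Bool × Bool) : Prop := out = count_christmas_alt tweet_text
instance (tweet_text : String) (out : Bool × Bool) : Decidable (Spec_count_christmas tweet_text out) := by unfold Spec_count_christmas; infer_instance

-- ===== CLAIM (what is proved, stated in full; the proofs are below) =====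
def Claim_equal_count_christmas : Prop := ∀ (tweet_text : String), Dom_count_christmas tweet_text → Spec_count_christmas tweet_text (count_christmas tweet_text)

-- ===== LEMMAS AND PROOFS =====

-- does p hold at some (nonempty) suffix of s?
def pvSuffAny (p : List Char → Bool) : List Char → Bool
  | [] => false
  | c :: t => p (c :: t) || pvSuffAny p t

theorem pvScan_eq (s : List Char) (m h : Bool) :
    pvScan s m h = (m || pvSuffAny pvMerryAt s, h || pvSuffAny pvHappyAt s) := by
  induction s generalizing m h with
  | nil => simp [pvScan, pvSuffAny]
  | cons c t ih =>
    by_cases hmh : (m && h) = true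
    · obtain ⟨rfl, rfl⟩ := Bool.and_eq_true_iff.mp hmh
      simp [pvScan]
    · have hm' : (if !m && pvMerryAt (c :: t) then true else m) = (m || pvMerryAt (c :: t)) := by
        cases m <;> simp
      have hh' : (if !h && pvHappyAt (c :: t) then true else h) = (h || pvHappyAt (c :: t)) := by
        cases h <;> simp
      simp only [pvScan, if_neg hmh, hm', hh', ih]
      simp [pvSuffAny, Bool.or_assoc]

theorem pvSuffAny_iff (p : List Char → Bool) (hp : p [] = false) (s : List Char) :
    pvSuffAny p s = true ↔ ∃ j, p (s.drop j) = true := by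
  induction s with
  | nil =>
    simp [pvSuffAny, hp]
  | cons c t ih =>
    simp only [pvSuffAny, Bool.or_eq_true, ih]
    constructor
    · rintro (h | ⟨j, hj⟩)
      · exact ⟨0, h⟩
      · exact ⟨j + 1, hj⟩
    · rintro ⟨j, hj⟩
      cases j with
      | zero => exact Or.inl hj
      | succ k => exact Or.inr ⟨k, hj⟩

theorem pv_prefix_append_iff (a b t : List Char) :
    (a ++ b) <+: t ↔ a <+: t ∧ b <+: t.drop a.length := by
  constructor
  · rintro ⟨s, rfl⟩
    exact ⟨⟨b ++ s, by simp⟩, by simp⟩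
  · rintro ⟨⟨s, rfl⟩, hb⟩
    simp at hb
    obtain ⟨u, rfl⟩ := hb
    exact ⟨u, by simp⟩

set_option maxHeartbeats 1000000 in
-- at a fixed position, B's MERRY test fires exactly when one of A's four merry phrases starts there
theorem pvMerryAt_iff (t : List Char) :
    pvMerryAt t = true ↔
      ("MERRY CHRISTMAS".toList <+: t ∨ "MERRY XMAS".toList <+: t ∨
       "MERRY-CHRISTMAS".toList <+: t ∨ "MERRY-XMAS".toList <+: t) := by
  have h1 : "MERRY CHRISTMAS".toList = "MERRY ".toList ++ "CHRISTMAS".toList := by decide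
  have h2 : "MERRY XMAS".toList = "MERRY ".toList ++ "XMAS".toList := by decide
  have h3 : "MERRY-CHRISTMAS".toList = "MERRY-".toList ++ "CHRISTMAS".toList := by decide
  have h4 : "MERRY-XMAS".toList = "MERRY-".toList ++ "XMAS".toList := by decide
  rw [h1, h2, h3, h4, pv_prefix_append_iff, pv_prefix_append_iff, pv_prefix_append_iff,
    pv_prefix_append_iff]
  simp only [pvMerryAt, pvBodyAt, Bool.and_eq_true, Bool.or_eq_true, List.isPrefixOf_iff_prefix]
  show _ ↔ _ ∧ _ <+: t.drop ("MERRY ".toList.length) ∨ _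
  norm_num
  tauto

set_option maxHeartbeats 1000000 in
theorem pvHappyAt_iff (t : List Char) :
    pvHappyAt t = true ↔
      ("HAPPY CHRISTMAS".toList <+: t ∨ "HAPPY XMAS".toList <+: t ∨
       "HAPPY-CHRISTMAS".toList <+: t ∨ "HAPPY-XMAS".toList <+: t) := by
  have h1 : "HAPPY CHRISTMAS".toList = "HAPPY ".toList ++ "CHRISTMAS".toList := by decide
  have h2 : "HAPPY XMAS".toList = "HAPPY ".toList ++ "XMAS".toList := by decide
  have h3 : "HAPPY-CHRISTMAS".toList = "HAPPY-".toList ++ "CHRISTMAS".toList := by decide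
  have h4 : "HAPPY-XMAS".toList = "HAPPY-".toList ++ "XMAS".toList := by decide
  rw [h1, h2, h3, h4, pv_prefix_append_iff, pv_prefix_append_iff, pv_prefix_append_iff,
    pv_prefix_append_iff]
  simp only [pvHappyAt, pvBodyAt, Bool.and_eq_true, Bool.or_eq_true, List.isPrefixOf_iff_prefix]
  show _ ↔ _ ∧ _ <+: t.drop ("HAPPY ".toList.length) ∨ _
  norm_num
  tauto

-- A's break loop is the disjunction of the four membership tests
theorem pvLoopA_eq (gs : List String) (t : String) (flag : Bool) :
    pvLoopA gs t flag = (flag || gs.any (fun g => PySem.Str.isIn g t)) := by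
  induction gs generalizing flag with
  | nil => simp [pvLoopA]
  | cons g rest ih =>
    simp only [pvLoopA, List.any_cons, ih]
    cases hg : PySem.Str.isIn g t <;> simp

-- the per-flag bridge: the single scan agrees with the four substring searches
theorem pvSuffAny_eq_loop (u : List Char) (at4 : List Char → Bool)
    (p1 p2 p3 p4 : String)
    (hat : ∀ t, at4 t = true ↔
      (p1.toList <+: t ∨ p2.toList <+: t ∨ p3.toList <+: t ∨ p4.toList <+: t))
    (hnil : at4 [] = false) :
    pvSuffAny at4 u =
      (PySem.Chars.isIn p1.toList u || PySem.Chars.isIn p2.toList u ||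
       PySem.Chars.isIn p3.toList u || PySem.Chars.isIn p4.toList u) := by
  rw [Bool.eq_iff_iff, pvSuffAny_iff at4 hnil]
  simp only [Bool.or_eq_true, ← PySem.Chars.exists_prefix_drop_iff_isIn]
  constructor
  · rintro ⟨j, hj⟩
    rcases (hat _).mp hj with h | h | h | h
    · exact Or.inl (Or.inl (Or.inl ⟨j, h⟩))
    · exact Or.inl (Or.inl (Or.inr ⟨j, h⟩))
    · exact Or.inl (Or.inr ⟨j, h⟩)
    · exact Or.inr ⟨j, h⟩
  · rintro (((⟨j, h⟩ | ⟨j, h⟩) | ⟨j, h⟩) | ⟨j, h⟩) <;>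
      exact ⟨j, (hat _).mpr (by tauto)⟩

-- ===== VERDICT (by name: the statement is the Claim_ definition above) =====
theorem count_christmas_spec : Claim_equal_count_christmas := by
  intro t _
  unfold Spec_count_christmas count_christmas count_christmas_alt
  rw [pvScan_eq]
  simp only [pvLoopA_eq, Bool.false_or, List.any_cons, List.any_nil, Bool.or_false]
  rw [Prod.mk.injEq]
  constructor
  · rw [pvSuffAny_eq_loop _ pvMerryAt "MERRY CHRISTMAS" "MERRY XMAS" "MERRY-CHRISTMAS"
      "MERRY-XMAS" pvMerryAt_iff (by decide)]
    simp [PySem.Str.isIn, Bool.or_assoc]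
  · rw [pvSuffAny_eq_loop _ pvHappyAt "HAPPY CHRISTMAS" "HAPPY XMAS" "HAPPY-CHRISTMAS"
      "HAPPY-XMAS" pvHappyAt_iff (by decide)]
    simp [PySem.Str.isIn, Bool.or_assoc]
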